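-- pv_equiv track=rewrite | github.com/KirkaProg/Performance-Lab-TZ | task1/task1.py | circular_path
-- ===== SOURCE A (Python) =====
-- def circular_path(n, m):
--     flow = []
--     current_num = 1  # Первый элемент
--
--     while True:
--         flow.append(current_num)
--         # Смещаемся на m - 1 шагов вперед, затем +1 обратно
--         current_num = ((current_num - 1 + m - 1) % n) + 1
--         if current_num == 1:  # Если вернулись к первому элементу — останавливаемся
--             break
--
--     return ''.join(map(str, flow))
-- ===== SOURCE B (Python) =====
-- import math
--
-- def circular_path(n, m):
--     # k-th visited position is ((k*(m-1)) % n) + 1; the cycle closes after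
--     # t = |n| / gcd(n, m-1) steps, so build the output directly.
--     t = abs(n) // math.gcd(n, m - 1)
--     return ''.join(str(((k * (m - 1)) % n) + 1) for k in range(t))
-- ===== Notes on version B (the rewrite author's own statement) =====
-- stated objective: alternative
-- what changed: Replaces A's iterate-until-back-to-start cycle-detection loop (two mods and a comparison per step, stop condition checked each iteration) by the closed-form cycle length t = |n| // gcd(n, m-1) followed by one direct generating pass over range(t) using the k-th-position formula ((k*(m-1)) % n) + 1.
-- outside the precondition, e.g. on circular_path(0, 2): A raises ZeroDivisionError, B returns ''
-- crash fix: On n = 0 with m != 1, A raises ZeroDivisionError at the first '% n' while B returns '' (the empty cycle); on n = 0, m = 1 both raise ZeroDivisionError. — e.g. on circular_path(0, 2): A raises ZeroDivisionError, B returns ""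
import Mathlib
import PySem

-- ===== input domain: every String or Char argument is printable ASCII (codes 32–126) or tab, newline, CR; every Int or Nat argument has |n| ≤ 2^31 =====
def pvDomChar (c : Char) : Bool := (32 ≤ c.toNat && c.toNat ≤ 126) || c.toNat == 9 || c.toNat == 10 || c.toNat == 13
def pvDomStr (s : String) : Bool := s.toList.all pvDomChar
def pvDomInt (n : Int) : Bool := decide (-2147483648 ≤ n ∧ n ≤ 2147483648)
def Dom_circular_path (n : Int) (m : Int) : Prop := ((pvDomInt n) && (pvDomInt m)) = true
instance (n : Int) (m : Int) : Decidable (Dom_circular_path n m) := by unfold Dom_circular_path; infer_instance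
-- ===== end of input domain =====

-- B replaces A's iterate-until-back-to-start loop with a closed-form cycle length
-- t = |n| / gcd(n, m-1) and one direct generating pass (objective: alternative).

-- ===== PORT A =====
-- A's while-True loop: append current, step, stop when back at 1.  Fuel n.natAbs
-- is a totality guard only (the cycle closes within |n| steps whenever n ≠ 0;
-- n = 0 raises in Python and is excluded by Pre_).
def circularLoopA (n : Int) (m : Int) : Nat → Int → List Int
  | 0, cur => [cur]
  | fuel + 1, cur =>
    let next := PySem.Int.mod (cur - 1 + m - 1) n + 1
    if next = 1 then [cur] else cur :: circularLoopA n m fuel next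

def circular_path (n : Int) (m : Int) : String :=
  PySem.Str.join "" ((circularLoopA n m n.natAbs 1).map PySem.Int.toStr)

-- ===== PORT B =====
def circular_path_alt (n : Int) (m : Int) : String :=
  let t : Nat := n.natAbs / Int.gcd n (m - 1)
  PySem.Str.join ""
    ((List.range t).map (fun (k : Nat) => PySem.Int.toStr (PySem.Int.mod ((k : Int) * (m - 1)) n + 1)))

-- ===== PRECONDITION & SPEC =====
-- Pre_ excludes exactly n = 0, where A raises ZeroDivisionError on the first '% n'.
def Pre_circular_path (n : Int) (m : Int) : Prop := n ≠ 0
instance (n : Int) (m : Int) : Decidable (Pre_circular_path n m) := by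
  unfold Pre_circular_path; infer_instance

def pvWitness_circular_path : Int × Int := (5, 3)

-- On n = 0 with m ≠ 1, A raises ZeroDivisionError while B returns '' (an empty cycle).
def Raises_circular_path (n : Int) (m : Int) : Prop := n = 0 ∧ m ≠ 1
instance (n : Int) (m : Int) : Decidable (Raises_circular_path n m) := by
  unfold Raises_circular_path; infer_instance
def pvRaiseWitness_circular_path : Int × Int := (0, 2)
def pvRaiseWitnessOut_circular_path : String := ""

def Spec_circular_path (n : Int) (m : Int) (out : String) : Prop := out = circular_path_alt n m
instance (n : Int) (m : Int) (out : String) : Decidable (Spec_circular_path n m out) := by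
  unfold Spec_circular_path; infer_instance

-- ===== CLAIM (what is proved, stated in full; the proofs are below) =====
def Claim_equal_circular_path : Prop := ∀ (n : Int) (m : Int), Dom_circular_path n m → Pre_circular_path n m → Spec_circular_path n m (circular_path n m)

def Claim_raises_circular_path : Prop := (∀ (n : Int) (m : Int), Dom_circular_path n m → Raises_circular_path n m → ¬ Pre_circular_path n m) ∧ (Dom_circular_path (pvRaiseWitness_circular_path.1) (pvRaiseWitness_circular_path.2) ∧ Raises_circular_path (pvRaiseWitness_circular_path.1) (pvRaiseWitness_circular_path.2) ∧ circular_path_alt (pvRaiseWitness_circular_path.1) (pvRaiseWitness_circular_path.2) = pvRaiseWitnessOut_circular_path)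

-- ===== LEMMAS AND PROOFS =====

-- the k-th visited position
def pvF (n m : Int) (k : Nat) : Int := PySem.Int.mod ((k : Int) * (m - 1)) n + 1

-- the closed-form cycle length
def pvT (n m : Int) : Nat := n.natAbs / Int.gcd n (m - 1)

lemma pvF_zero (n m : Int) : pvF n m 0 = 1 := by
  simp [pvF, PySem.Int.mod]

lemma fmod_absorb (a b n : Int) : Int.fmod (Int.fmod a n + b) n = Int.fmod (a + b) n := by
  rw [Int.fmod_def a n,
    show a - n * a.fdiv n + b = a + b + n * (-(a.fdiv n)) by ring,
    Int.add_mul_fmod_self_left]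

lemma pvF_step (n m : Int) (j : Nat) :
    PySem.Int.mod (pvF n m j - 1 + m - 1) n + 1 = pvF n m (j + 1) := by
  simp only [pvF, PySem.Int.mod]
  rw [show ((j : Int) * (m - 1)).fmod n + 1 - 1 + m - 1
        = ((j : Int) * (m - 1)).fmod n + (m - 1) by ring]
  rw [fmod_absorb]
  congr 2
  push_cast
  ring

-- N ∣ k*D ↔ (N / gcd N D) ∣ k, for N > 0
lemma nat_dvd_mul_iff_div_gcd (N D k : Nat) (h : 0 < N) :
    N ∣ k * D ↔ (N / Nat.gcd N D) ∣ k := by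
  have hg : 0 < Nat.gcd N D := Nat.gcd_pos_of_pos_left _ h
  have ht : Nat.gcd N D * (N / Nat.gcd N D) = N := Nat.mul_div_cancel' (Nat.gcd_dvd_left N D)
  have hd : Nat.gcd N D * (D / Nat.gcd N D) = D := Nat.mul_div_cancel' (Nat.gcd_dvd_right N D)
  have hcop : Nat.Coprime (N / Nat.gcd N D) (D / Nat.gcd N D) :=
    Nat.coprime_div_gcd_div_gcd hg
  constructor
  · rintro ⟨c, hc⟩
    have hkd : k * (D / Nat.gcd N D) = (N / Nat.gcd N D) * c := by
      apply Nat.eq_of_mul_eq_mul_left hg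
      calc Nat.gcd N D * (k * (D / Nat.gcd N D))
          = k * (Nat.gcd N D * (D / Nat.gcd N D)) := by ring
        _ = k * D := by rw [hd]
        _ = N * c := hc
        _ = Nat.gcd N D * (N / Nat.gcd N D) * c := by rw [ht]
        _ = Nat.gcd N D * (N / Nat.gcd N D * c) := by ring
    exact hcop.dvd_of_dvd_mul_right ⟨c, hkd⟩
  · rintro ⟨c, hc⟩
    refine ⟨c * (D / Nat.gcd N D), ?_⟩
    calc k * D = (N / Nat.gcd N D * c) * D := by rw [hc]
      _ = (N / Nat.gcd N D * c) * (Nat.gcd N D * (D / Nat.gcd N D)) := by rw [hd]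
      _ = (Nat.gcd N D * (N / Nat.gcd N D)) * (c * (D / Nat.gcd N D)) := by ring
      _ = N * (c * (D / Nat.gcd N D)) := by rw [ht]

lemma pvF_eq_one_iff (n m : Int) (hn : n ≠ 0) (k : Nat) :
    pvF n m k = 1 ↔ pvT n m ∣ k := by
  have h1 : pvF n m k = 1 ↔ PySem.Int.mod ((k : Int) * (m - 1)) n = 0 := by
    unfold pvF; omega
  rw [h1, PySem.Int.mod_eq_zero_iff_dvd]
  have h2 : n ∣ (k : Int) * (m - 1) ↔ n.natAbs ∣ k * (m - 1).natAbs := by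
    rw [← Int.natAbs_dvd_natAbs, Int.natAbs_mul, Int.natAbs_natCast]
  rw [h2, nat_dvd_mul_iff_div_gcd _ _ _ (Int.natAbs_pos.mpr hn)]
  rfl

lemma pvT_pos (n m : Int) (hn : n ≠ 0) : 0 < pvT n m := by
  have hN : 0 < n.natAbs := Int.natAbs_pos.mpr hn
  have hg : 0 < Int.gcd n (m - 1) := Nat.gcd_pos_of_pos_left _ hN
  exact Nat.div_pos (Nat.le_of_dvd hN (Nat.gcd_dvd_left _ _)) hg

lemma pvT_le (n m : Int) : pvT n m ≤ n.natAbs := Nat.div_le_self _ _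

lemma loop_eq (n m : Int) (hn : n ≠ 0) : ∀ (fuel j : Nat),
    j < pvT n m → pvT n m ≤ j + 1 + fuel →
    circularLoopA n m fuel (pvF n m j) =
      (List.range (pvT n m - j)).map (fun i => pvF n m (j + i)) := by
  intro fuel
  induction fuel with
  | zero =>
    intro j hj hle
    have : pvT n m - j = 1 := by omega
    simp [circularLoopA, this]
  | succ fuel ih =>
    intro j hj hle
    rw [show circularLoopA n m (fuel + 1) (pvF n m j)
        = if PySem.Int.mod (pvF n m j - 1 + m - 1) n + 1 = 1 then [pvF n m j]
          else pvF n m j :: circularLoopA n m fuel (PySem.Int.mod (pvF n m j - 1 + m - 1) n + 1)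
      from rfl]
    rw [pvF_step]
    by_cases h1 : pvF n m (j + 1) = 1
    · have hdvd := (pvF_eq_one_iff n m hn (j + 1)).mp h1
      have : j + 1 = pvT n m := by
        have := Nat.le_of_dvd (by omega) hdvd
        omega
      have ht : pvT n m - j = 1 := by omega
      simp [h1, ht]
    · have hne : ¬ pvT n m ∣ (j + 1) := fun h => h1 ((pvF_eq_one_iff n m hn (j + 1)).mpr h)
      have hneq : j + 1 ≠ pvT n m := fun he => hne (he ▸ dvd_refl _)
      have hjlt : j + 1 < pvT n m := by omega
      have hsub : pvT n m - j = (pvT n m - (j + 1)) + 1 := by omega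
      rw [if_neg h1, ih (j + 1) hjlt (by omega), hsub, List.range_succ_eq_map,
        List.map_cons, List.map_map]
      simp only [Nat.add_zero]
      congr 1
      apply List.map_congr_left
      intro a _
      simp only [Function.comp]
      congr 1
      omega

-- ===== VERDICT (by name: the statement is the Claim_ definition above) =====
theorem circular_path_spec : Claim_equal_circular_path := by
  intro n m _ hn
  unfold Spec_circular_path circular_path circular_path_alt
  have key : circularLoopA n m n.natAbs 1 = (List.range (pvT n m)).map (pvF n m) := by
    have h := loop_eq n m hn n.natAbs 0 (pvT_pos n m hn) (by have := pvT_le n m; omega)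
    rw [pvF_zero] at h
    simpa using h
  rw [key, List.map_map]
  rfl

@[simp] theorem circular_path_raises : Claim_raises_circular_path := by
  unfold Claim_raises_circular_path
  refine ⟨?_, by decide⟩
  intro n m _ hr
  simp [Raises_circular_path, Pre_circular_path] at *
  exact hr.1
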